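-- pv_equiv track=rewrite | github.com/rodbergerrone/bootcamp | modules/math/mathematica/algebra/matrices.py | sub_matrices
-- ===== SOURCE A (Python) =====
-- def sub_matrices(m1, m2):
--     for i in m2:
--         if i in m1:
--             m1.remove(i)
--         else:
--             m1.append(i)
--     m1.sort()
--     return m1
-- ===== SOURCE B (Python) =====
-- def sub_matrices(m1, m2):
--     s1 = sorted(m1)
--     s2 = sorted(m2)
--     res = []
--     i = j = 0
--     n1, n2 = len(s1), len(s2)
--     while i < n1 or j < n2:
--         if j == n2 or (i < n1 and s1[i] < s2[j]):
--             v = s1[i]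
--         else:
--             v = s2[j]
--         c1 = 0
--         while i < n1 and s1[i] == v:
--             c1 += 1
--             i += 1
--         c2 = 0
--         while j < n2 and s2[j] == v:
--             c2 += 1
--             j += 1
--         k = c1 - c2 if c1 >= c2 else (c2 - c1) % 2
--         res.extend([v] * k)
--     m1[:] = res
--     return m1
-- ===== Notes on version B (the rewrite author's own statement) =====
-- stated objective: faster
-- what changed: A toggles each m2 element against m1 with linear 'in'/remove/append scans and then sorts; B sorts both lists once and does a single two-pointer merge pass that counts each value's run in both lists and emits its residual multiplicity (c1-c2 if c1>=c2 else (c2-c1)%2) directly in sorted order.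
import Mathlib
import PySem

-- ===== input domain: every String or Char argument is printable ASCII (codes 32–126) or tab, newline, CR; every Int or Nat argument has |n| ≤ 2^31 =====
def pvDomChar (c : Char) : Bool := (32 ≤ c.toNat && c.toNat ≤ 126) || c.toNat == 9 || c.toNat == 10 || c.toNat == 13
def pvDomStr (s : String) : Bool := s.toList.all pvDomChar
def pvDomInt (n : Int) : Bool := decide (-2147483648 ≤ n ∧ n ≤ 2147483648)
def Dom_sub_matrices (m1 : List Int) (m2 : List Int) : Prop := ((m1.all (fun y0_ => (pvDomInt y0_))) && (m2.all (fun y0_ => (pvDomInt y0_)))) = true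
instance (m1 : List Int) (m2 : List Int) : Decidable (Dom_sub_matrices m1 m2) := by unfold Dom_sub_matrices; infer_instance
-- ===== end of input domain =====

-- B replaces A's quadratic remove/append toggle loop by a single two-pointer merge of the two
-- sorted lists emitting each value's residual multiplicity; both A and B mutate m1 in place
-- (A toggles then sorts, B assigns m1[:] = result) and the equivalence proved is about the
-- returned value.

-- ===== PORT A =====
def sub_matrices (m1 : List Int) (m2 : List Int) : List Int :=
  PySem.List.sorted
    (m2.foldl (fun acc i =>
      if i ∈ acc then (PySem.List.remove? acc i).getD acc
      else acc ++ [i]) m1)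
    (fun x => x) false

-- ===== PORT B =====
-- head value chosen by Source B's outer loop: smaller head of the two (sorted) remainders
def pvHeadMin (s1 : List Int) (s2 : List Int) : Int :=
  match s1, s2 with
  | x :: _, y :: _ => min x y
  | x :: _, [] => x
  | [], y :: _ => y
  | [], [] => 0

theorem pvHeadMin_dec (s1 s2 : List Int) (h : ¬(s1 = [] ∧ s2 = [])) :
    (s1.dropWhile (· == pvHeadMin s1 s2)).length + (s2.dropWhile (· == pvHeadMin s1 s2)).length
      < s1.length + s2.length := by
  have hle : ∀ (l : List Int) (v : Int), (l.dropWhile (· == v)).length ≤ l.length :=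
    fun l v => (List.dropWhile_sublist _).length_le
  have hlt : ∀ (x : Int) (t : List Int) (v : Int), x = v →
      ((x :: t).dropWhile (· == v)).length < (x :: t).length := by
    intro x t v hx
    simp [hx]
    exact hle t v
  match s1, s2 with
  | [], [] => exact absurd ⟨rfl, rfl⟩ h
  | x :: t, [] =>
    simpa using hlt x t (pvHeadMin (x :: t) []) (by simp [pvHeadMin])
  | [], y :: t =>
    simpa using hlt y t (pvHeadMin [] (y :: t)) (by simp [pvHeadMin])
  | x :: t1, y :: t2 =>
    rcases le_total x y with hxy | hxy
    · have := hlt x t1 (pvHeadMin (x :: t1) (y :: t2)) (by simp [pvHeadMin, min_eq_left hxy])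
      have h2 := hle (y :: t2) (pvHeadMin (x :: t1) (y :: t2))
      omega
    · have := hlt y t2 (pvHeadMin (x :: t1) (y :: t2)) (by simp [pvHeadMin, min_eq_right hxy])
      have h2 := hle (x :: t1) (pvHeadMin (x :: t1) (y :: t2))
      omega

-- Source B's outer while loop: consume the run of the smallest remaining value from both lists,
-- emit its residual multiplicity
def pvMergeToggle (s1 : List Int) (s2 : List Int) : List Int :=
  if h : s1 = [] ∧ s2 = [] then []
  else
    let v := pvHeadMin s1 s2
    let c1 := (s1.takeWhile (· == v)).length
    let t1 := s1.dropWhile (· == v)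
    let c2 := (s2.takeWhile (· == v)).length
    let t2 := s2.dropWhile (· == v)
    let k := if c2 ≤ c1 then c1 - c2 else (c2 - c1) % 2
    List.replicate k v ++ pvMergeToggle t1 t2
termination_by s1.length + s2.length
decreasing_by exact pvHeadMin_dec s1 s2 h

def sub_matrices_alt (m1 : List Int) (m2 : List Int) : List Int :=
  pvMergeToggle (PySem.List.sorted m1 (fun x => x) false) (PySem.List.sorted m2 (fun x => x) false)

-- ===== PRECONDITION & SPEC =====
def Spec_sub_matrices (m1 : List Int) (m2 : List Int) (out : List Int) : Prop := out = sub_matrices_alt m1 m2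
instance (m1 : List Int) (m2 : List Int) (out : List Int) : Decidable (Spec_sub_matrices m1 m2 out) := by unfold Spec_sub_matrices; infer_instance

-- ===== CLAIM (what is proved, stated in full; the proofs are below) =====
def Claim_equal_sub_matrices : Prop := ∀ (m1 : List Int) (m2 : List Int), Dom_sub_matrices m1 m2 → Spec_sub_matrices m1 m2 (sub_matrices m1 m2)

-- ===== LEMMAS AND PROOFS =====

-- residual multiplicity of a value with c1 copies in m1 and c2 in m2
def pvF (c1 c2 : Nat) : Nat := if c2 ≤ c1 then c1 - c2 else (c2 - c1) % 2

-- one toggle step's effect on a single value's count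
def pvTog (c : Nat) : Nat := if 0 < c then c - 1 else c + 1

def pvIter : Nat → Nat → Nat
  | c, 0 => c
  | c, n + 1 => pvIter (pvTog c) n

theorem pvIter_eq (n c : Nat) : pvIter c n = pvF c n := by
  induction n generalizing c with
  | zero => simp [pvIter, pvF]
  | succ n ih =>
    show pvIter (pvTog c) n = pvF c (n + 1)
    rw [ih]
    unfold pvF pvTog
    split_ifs <;> omega

-- A's loop, per-value count
theorem pvLoop_count (m2 : List Int) (acc : List Int) (v : Int) :
    (m2.foldl (fun acc i =>
      if i ∈ acc then (PySem.List.remove? acc i).getD acc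
      else acc ++ [i]) acc).count v = pvIter (acc.count v) (m2.count v) := by
  induction m2 generalizing acc with
  | nil => simp [pvIter]
  | cons i rest ih =>
    simp only [List.foldl_cons]
    rw [ih]
    have hstep : pvIter (List.count v acc) (List.count v (i :: rest)) =
        pvIter (if v = i then pvTog (List.count v acc) else List.count v acc) (List.count v rest) := by
      by_cases hv : v = i
      · subst hv
        rw [List.count_cons_self, if_pos rfl]
        rfl
      · rw [List.count_cons_of_ne (Ne.symm hv), if_neg hv]
    rw [hstep]
    congr 1
    by_cases hmem : i ∈ acc
    · rw [if_pos hmem, PySem.List.remove?_eq_some_erase acc i hmem]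
      simp only [Option.getD_some]
      by_cases hv : v = i
      · subst hv
        have hpos : 0 < acc.count v := List.count_pos_iff.mpr hmem
        rw [List.count_erase_self, if_pos rfl]
        unfold pvTog
        rw [if_pos hpos]
      · rw [List.count_erase_of_ne hv, if_neg hv]
    · rw [if_neg hmem, List.count_append, List.count_singleton]
      by_cases hv : v = i
      · subst hv
        have hzero : acc.count v = 0 := List.count_eq_zero.mpr hmem
        simp [hzero, pvTog]
      · simp [Ne.symm hv, hv]

-- in a sorted list whose elements are all ≥ v, the leading run captures every copy of v
theorem pvRun_spec (l : List Int) (v : Int) (hs : l.Pairwise (· ≤ ·)) (hge : ∀ x ∈ l, v ≤ x) :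
    (l.takeWhile (· == v)).length = l.count v ∧ ∀ x ∈ l.dropWhile (· == v), v < x := by
  induction l with
  | nil => simp
  | cons x t ih =>
    have hst : t.Pairwise (· ≤ ·) := hs.of_cons
    have hget : ∀ y ∈ t, v ≤ y := fun y hy => hge y (List.mem_cons_of_mem _ hy)
    by_cases hx : x = v
    · subst hx
      have := ih hst hget
      constructor
      · simp only [List.takeWhile_cons, List.count_cons_self, beq_self_eq_true, if_true]
        simp [this.1]
      · simpa [List.dropWhile_cons] using this.2
    · have hvx : v < x := lt_of_le_of_ne (hge x (List.mem_cons_self)) (fun h => hx h.symm)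
      constructor
      · have hcnt : t.count v = 0 := by
          rw [List.count_eq_zero]
          intro hmem
          have := List.rel_of_pairwise_cons hs hmem
          have := hget v hmem
          omega
        simp [hx, hcnt]
      · intro y hy
        rw [List.dropWhile_cons_of_neg (by simp [hx])] at hy
        rcases List.mem_cons.mp hy with rfl | hyt
        · exact hvx
        · exact lt_of_lt_of_le hvx (List.rel_of_pairwise_cons hs hyt)

theorem pvHeadMin_le (s1 s2 : List Int) (h1 : s1.Pairwise (· ≤ ·)) (h2 : s2.Pairwise (· ≤ ·))
    (h : ¬(s1 = [] ∧ s2 = [])) :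
    (∀ x ∈ s1, pvHeadMin s1 s2 ≤ x) ∧ (∀ x ∈ s2, pvHeadMin s1 s2 ≤ x) := by
  have hhead : ∀ (x : Int) (t : List Int), (x :: t).Pairwise (· ≤ ·) → ∀ y ∈ x :: t, x ≤ y := by
    intro x t hp y hy
    rcases List.mem_cons.mp hy with rfl | hyt
    · exact le_refl y
    · exact List.rel_of_pairwise_cons hp hyt
  match s1, s2 with
  | [], [] => exact absurd ⟨rfl, rfl⟩ h
  | x :: t, [] => exact ⟨fun y hy => hhead x t h1 y hy, by simp⟩
  | [], y :: t => exact ⟨by simp, fun z hz => hhead y t h2 z hz⟩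
  | x :: t1, y :: t2 =>
    refine ⟨fun z hz => ?_, fun z hz => ?_⟩
    · exact le_trans (by simp [pvHeadMin]) (hhead x t1 h1 z hz)
    · exact le_trans (by simp [pvHeadMin]) (hhead y t2 h2 z hz)

theorem pvHeadMin_mem (s1 s2 : List Int) (h : ¬(s1 = [] ∧ s2 = [])) :
    pvHeadMin s1 s2 ∈ s1 ∨ pvHeadMin s1 s2 ∈ s2 := by
  match s1, s2 with
  | [], [] => exact absurd ⟨rfl, rfl⟩ h
  | x :: t, [] => left; simp [pvHeadMin]
  | [], y :: t => right; simp [pvHeadMin]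
  | x :: t1, y :: t2 =>
    rcases le_total x y with hxy | hxy
    · left; simp [pvHeadMin, min_eq_left hxy]
    · right; simp [pvHeadMin, min_eq_right hxy]

theorem pvMergeToggle_mem (s1 s2 : List Int) :
    ∀ x ∈ pvMergeToggle s1 s2, x ∈ s1 ∨ x ∈ s2 := by
  induction s1, s2 using pvMergeToggle.induct with
  | case1 s1 s2 h => rw [pvMergeToggle, dif_pos h]; simp
  | case2 s1 s2 h v t1 t2 ih =>
    rw [pvMergeToggle, dif_neg h]
    intro x hx
    rcases List.mem_append.mp hx with hx | hx
    · have : x = pvHeadMin s1 s2 := List.eq_of_mem_replicate hx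
      subst this
      exact pvHeadMin_mem s1 s2 h
    · rcases ih x hx with h1 | h1
      · exact Or.inl ((List.dropWhile_sublist _).mem h1)
      · exact Or.inr ((List.dropWhile_sublist _).mem h1)

theorem pvCount_dropWhile_of_ne (l : List Int) (v w : Int) (hw : w ≠ v) :
    (l.dropWhile (· == v)).count w = l.count w := by
  conv_rhs => rw [← List.takeWhile_append_dropWhile (p := (· == v)) (l := l)]
  rw [List.count_append]
  have : (l.takeWhile (· == v)).count w = 0 := by
    rw [List.count_eq_zero]
    intro hmem
    have := List.mem_takeWhile_imp hmem
    simp at this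
    exact hw this
  omega

theorem pvMergeToggle_count (s1 s2 : List Int) :
    s1.Pairwise (· ≤ ·) → s2.Pairwise (· ≤ ·) →
    ∀ w : Int, (pvMergeToggle s1 s2).count w = pvF (s1.count w) (s2.count w) := by
  induction s1, s2 using pvMergeToggle.induct with
  | case1 s1 s2 h =>
    intro _ _ w
    rw [pvMergeToggle, dif_pos h, h.1, h.2]
    simp [pvF]
  | case2 s1 s2 h v t1 t2 ih =>
    intro h1 h2 w
    rw [pvMergeToggle, dif_neg h]
    have hge := pvHeadMin_le s1 s2 h1 h2 h
    have hr1 := pvRun_spec s1 (pvHeadMin s1 s2) h1 hge.1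
    have hr2 := pvRun_spec s2 (pvHeadMin s1 s2) h2 hge.2
    have ht1 : (s1.dropWhile (· == pvHeadMin s1 s2)).Pairwise (· ≤ ·) :=
      h1.sublist (List.dropWhile_sublist _)
    have ht2 : (s2.dropWhile (· == pvHeadMin s1 s2)).Pairwise (· ≤ ·) :=
      h2.sublist (List.dropWhile_sublist _)
    rw [List.count_append, List.count_replicate, ih ht1 ht2 w]
    by_cases hw : w = pvHeadMin s1 s2
    · have hz1 : (s1.dropWhile (· == pvHeadMin s1 s2)).count w = 0 := by
        rw [List.count_eq_zero]
        intro hmem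
        have := hr1.2 w hmem
        omega
      have hz2 : (s2.dropWhile (· == pvHeadMin s1 s2)).count w = 0 := by
        rw [List.count_eq_zero]
        intro hmem
        have := hr2.2 w hmem
        omega
      have hc1 : (s1.takeWhile (· == pvHeadMin s1 s2)).length = s1.count w := by
        rw [hr1.1, hw]
      have hc2 : (s2.takeWhile (· == pvHeadMin s1 s2)).length = s2.count w := by
        rw [hr2.1, hw]
      rw [hz1, hz2, if_pos (by simp [hw]), hc1, hc2]
      simp [pvF]
    · rw [if_neg (by simpa using fun hh => hw hh.symm)]
      rw [pvCount_dropWhile_of_ne s1 _ w hw, pvCount_dropWhile_of_ne s2 _ w hw]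
      omega

theorem pvMergeToggle_sorted (s1 s2 : List Int) :
    s1.Pairwise (· ≤ ·) → s2.Pairwise (· ≤ ·) →
    (pvMergeToggle s1 s2).Pairwise (· ≤ ·) := by
  induction s1, s2 using pvMergeToggle.induct with
  | case1 s1 s2 h =>
    intro _ _
    rw [pvMergeToggle, dif_pos h]
    simp
  | case2 s1 s2 h v t1 t2 ih =>
    intro h1 h2
    rw [pvMergeToggle, dif_neg h]
    have hge := pvHeadMin_le s1 s2 h1 h2 h
    have hr1 := pvRun_spec s1 (pvHeadMin s1 s2) h1 hge.1
    have hr2 := pvRun_spec s2 (pvHeadMin s1 s2) h2 hge.2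
    have ht1 : (s1.dropWhile (· == pvHeadMin s1 s2)).Pairwise (· ≤ ·) :=
      h1.sublist (List.dropWhile_sublist _)
    have ht2 : (s2.dropWhile (· == pvHeadMin s1 s2)).Pairwise (· ≤ ·) :=
      h2.sublist (List.dropWhile_sublist _)
    rw [List.pairwise_append]
    refine ⟨List.pairwise_replicate.mpr (Or.inr le_rfl), ih ht1 ht2, ?_⟩
    intro a ha b hb
    have hav : a = pvHeadMin s1 s2 := List.eq_of_mem_replicate ha
    subst hav
    rcases pvMergeToggle_mem _ _ b hb with hbm | hbm
    · exact le_of_lt (hr1.2 b hbm)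
    · exact le_of_lt (hr2.2 b hbm)

-- ===== VERDICT (by name: the statement is the Claim_ definition above) =====
theorem sub_matrices_spec : Claim_equal_sub_matrices := by
  intro m1 m2 _
  show sub_matrices m1 m2 = sub_matrices_alt m1 m2
  unfold sub_matrices sub_matrices_alt
  have hp1 : (PySem.List.sorted m1 (fun x => x) false).Pairwise (· ≤ ·) :=
    PySem.List.sorted_pairwise m1 (fun x => x)
  have hp2 : (PySem.List.sorted m2 (fun x => x) false).Pairwise (· ≤ ·) :=
    PySem.List.sorted_pairwise m2 (fun x => x)
  have hR : (pvMergeToggle (PySem.List.sorted m1 (fun x => x) false)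
      (PySem.List.sorted m2 (fun x => x) false)).Pairwise (· ≤ ·) :=
    pvMergeToggle_sorted _ _ hp1 hp2
  have hperm : (pvMergeToggle (PySem.List.sorted m1 (fun x => x) false)
      (PySem.List.sorted m2 (fun x => x) false)).Perm
      (m2.foldl (fun acc i =>
        if i ∈ acc then (PySem.List.remove? acc i).getD acc
        else acc ++ [i]) m1) := by
    rw [List.perm_iff_count]
    intro a
    rw [pvLoop_count, pvIter_eq,
      pvMergeToggle_count _ _ hp1 hp2 a,
      (PySem.List.sorted_perm m1 (fun x => x) false).count_eq,
      (PySem.List.sorted_perm m2 (fun x => x) false).count_eq]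
  exact PySem.List.sorted_id_eq_of_perm_of_pairwise _ _ hperm hR
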